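-- pv_equiv track=rewrite | github.com/bariscelikW/Number-Board-Game | main.py | row_del
-- ===== SOURCE A (Python) =====
-- def row_del(board):
--     # if a row's all elements consist of -1(deleted item), delete this row
--     rows_to_delete = set()
--
--     for i in range(len(board)):
--         if all(cell == -1 for cell in board[i]):
--             rows_to_delete.add(i)
--
--     rows_to_delete = sorted(list(rows_to_delete), reverse=True)
--
--     for row in rows_to_delete:
--         board.pop(row)
--
--     return board
-- ===== SOURCE B (Python) =====
-- def row_del(board):
--     # keep only rows with at least one surviving cell; write back in place
--     board[:] = [row for row in board if any(cell != -1 for cell in row)]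
--     return board
-- ===== Notes on version B (the rewrite author's own statement) =====
-- stated objective: simpler
-- what changed: Replaces A's collect-indices-into-a-set, sort-descending, pop-from-end strategy with a single keep-the-survivors filtering pass written back via slice assignment.
import Mathlib
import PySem

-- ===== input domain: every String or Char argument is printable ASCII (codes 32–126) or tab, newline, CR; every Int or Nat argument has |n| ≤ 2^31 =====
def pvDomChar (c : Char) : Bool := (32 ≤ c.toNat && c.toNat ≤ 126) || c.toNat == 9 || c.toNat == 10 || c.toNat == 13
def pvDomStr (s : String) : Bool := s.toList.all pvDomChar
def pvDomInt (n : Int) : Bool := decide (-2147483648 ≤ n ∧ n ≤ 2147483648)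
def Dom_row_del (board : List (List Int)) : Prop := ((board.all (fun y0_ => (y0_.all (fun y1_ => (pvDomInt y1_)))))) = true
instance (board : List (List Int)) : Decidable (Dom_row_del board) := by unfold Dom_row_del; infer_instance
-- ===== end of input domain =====

-- B replaces A's collect-indices / sort-descending / pop-from-end deletion with one direct
-- keep-the-survivors filter (simpler); both Pythons mutate `board` in place to the same final
-- contents and return it, so the proved return-value equivalence also covers the side effect.

-- ===== PORT A =====
def row_del (board : List (List Int)) : List (List Int) :=
  let rows_to_delete : PySem.Set Int :=
    (PySem.List.pyRange 0 (board.length : Int) 1).foldl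
      (fun s i =>
        if (PySem.List.pyGetD board i []).all (fun cell => cell == -1) then
          PySem.Set.add s i
        else s)
      PySem.Set.empty
  -- sorted(list(s), reverse=True): sorted without key over a Set, order-independent
  let rows_sorted := PySem.List.sorted rows_to_delete (fun x => x) true
  -- board.pop(row): every popped index is in range here, so the getD default is never taken
  rows_sorted.foldl (fun b row => ((PySem.List.pop? b row).map Prod.snd).getD b) board

-- ===== PORT B =====
def row_del_alt (board : List (List Int)) : List (List Int) :=
  board.filter (fun row => row.any (fun cell => cell != -1))

-- ===== PRECONDITION & SPEC =====
def Spec_row_del (board : List (List Int)) (out : List (List Int)) : Prop := out = row_del_alt board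
instance (board : List (List Int)) (out : List (List Int)) : Decidable (Spec_row_del board out) := by unfold Spec_row_del; infer_instance

-- ===== CLAIM (what is proved, stated in full; the proofs are below) =====
def Claim_equal_row_del : Prop := ∀ (board : List (List Int)), Dom_row_del board → Spec_row_del board (row_del board)

-- ===== LEMMAS AND PROOFS =====

-- A's first loop: adding fresh elements of a duplicate-free list to a set is filtering.
theorem pv_foldl_add_filter (p : Int → Bool) (xs : List Int) (acc : List Int)
    (hnd : xs.Nodup) (hdis : ∀ i ∈ xs, i ∉ acc) :
    xs.foldl (fun s i => if p i then PySem.Set.add s i else s) acc = acc ++ xs.filter p := by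
  induction xs generalizing acc with
  | nil => simp
  | cons x t ih =>
    have hx : x ∉ acc := hdis x (by simp)
    by_cases hp : p x
    · have hadd : PySem.Set.add acc x = acc ++ [x] := by
        simp [PySem.Set.add, PySem.Set.contains, hx]
      have := ih (acc ++ [x]) hnd.of_cons (by
        intro i hi
        simp only [List.mem_append, List.mem_singleton]
        rintro (h | rfl)
        · exact hdis i (by simp [hi]) h
        · exact (List.nodup_cons.mp hnd).1 hi)
      simp [hp, hadd, this]
    · have := ih acc hnd.of_cons (fun i hi => hdis i (by simp [hi]))
      simp [hp, this]

-- Popping a strictly descending list of indices of `bs` does not touch an appended tail.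
theorem pv_popAll_append (l : List Int) (bs rest : List (List Int))
    (hp : l.Pairwise (fun a b => b < a)) (hb : ∀ i ∈ l, 0 ≤ i ∧ i < (bs.length : Int)) :
    l.foldl (fun b row => ((PySem.List.pop? b row).map Prod.snd).getD b) (bs ++ rest)
    = (l.foldl (fun b row => ((PySem.List.pop? b row).map Prod.snd).getD b) bs) ++ rest := by
  induction l generalizing bs with
  | nil => simp
  | cons i t ih =>
    obtain ⟨h0, h1⟩ := hb i (by simp)
    have hi : i = (i.toNat : Int) := (Int.toNat_of_nonneg h0).symm
    have hlt : i.toNat < bs.length := by omega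
    have hlt' : i.toNat < (bs ++ rest).length := by simp; omega
    have e1 : PySem.List.pop? (bs ++ rest) i = some ((bs ++ rest)[i.toNat], (bs ++ rest).eraseIdx i.toNat) := by
      have h := PySem.List.pop?_natCast (bs ++ rest) i.toNat hlt'
      rwa [Int.toNat_of_nonneg h0] at h
    have e2 : PySem.List.pop? bs i = some (bs[i.toNat], bs.eraseIdx i.toNat) := by
      have h := PySem.List.pop?_natCast bs i.toNat hlt
      rwa [Int.toNat_of_nonneg h0] at h
    have eer : (bs ++ rest).eraseIdx i.toNat = bs.eraseIdx i.toNat ++ rest :=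
      List.eraseIdx_append_of_lt_length hlt rest
    simp only [List.foldl_cons, e1, e2, eer, Option.map_some, Option.getD_some]
    exact ih (bs.eraseIdx i.toNat) hp.of_cons (by
      intro j hj
      obtain ⟨hj0, _⟩ := hb j (by simp [hj])
      have hji : j < i := (List.pairwise_cons.mp hp).1 j hj
      constructor
      · exact hj0
      · rw [List.length_eraseIdx_of_lt hlt]; omega)

-- A's second loop (pop the bad indices back-to-front) is B's filter.
theorem pv_pop_filter (p : List Int → Bool) (board : List (List Int)) :
    (((PySem.List.pyRange 0 (board.length : Int) 1).filter
        (fun i => p (PySem.List.pyGetD board i []))).reverse).foldl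
      (fun b row => ((PySem.List.pop? b row).map Prod.snd).getD b) board
    = board.filter (fun r => !(p r)) := by
  induction board using List.reverseRecOn with
  | nil => simp [PySem.List.pyRange_one_eq_nil (le_refl 0)]
  | append_singleton bs r ih =>
    have hn0 : (0:Int) ≤ (bs.length : Int) := by positivity
    have hlen : ((bs ++ [r]).length : Int) = (bs.length : Int) + 1 := by simp
    have hrange : PySem.List.pyRange 0 ((bs ++ [r]).length : Int) 1
        = PySem.List.pyRange 0 (bs.length : Int) 1 ++ [(bs.length : Int)] := by
      rw [hlen]; exact PySem.List.pyRange_one_succ_right hn0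
    -- on indices below bs.length the predicate reads bs
    have hcongr : (PySem.List.pyRange 0 (bs.length : Int) 1).filter
          (fun i => p (PySem.List.pyGetD (bs ++ [r]) i []))
        = (PySem.List.pyRange 0 (bs.length : Int) 1).filter
          (fun i => p (PySem.List.pyGetD bs i [])) := by
      apply List.filter_congr
      intro i hi
      obtain ⟨h0, h1⟩ := PySem.List.mem_pyRange_one.mp hi
      have hlt : i.toNat < bs.length := by omega
      rw [PySem.List.pyGetD_eq_getElem _ _ h0 (by simp; omega),
          PySem.List.pyGetD_eq_getElem _ _ h0 (by omega),
          List.getElem_append_left hlt]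
    have hlast : PySem.List.pyGetD (bs ++ [r]) (bs.length : Int) [] = r := by
      rw [PySem.List.pyGetD_eq_getElem _ _ hn0 (by simp)]
      simp
    have hpopn : PySem.List.pop? (bs ++ [r]) ((bs.length : Int)) = some (r, bs) := by
      have := PySem.List.pop?_natCast (bs ++ [r]) bs.length (by simp)
      simpa [List.eraseIdx_append_of_length_le (le_refl _)] using this
    cases hp : p r with
    | true =>
      -- last row is deleted first, then induction on bs
      rw [hrange, List.filter_append, hcongr]
      simp only [List.filter_cons, List.filter_nil, hlast, hp, if_true]
      rw [List.reverse_append]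
      simp only [List.reverse_cons, List.reverse_nil, List.nil_append, List.singleton_append,
        List.foldl_cons, hpopn, Option.map_some, Option.getD_some]
      rw [ih]
      simp [List.filter_append, hp]
    | false =>
      -- last row survives; the pops never reach it
      rw [hrange, List.filter_append, hcongr]
      simp only [List.filter_cons, List.filter_nil, hlast, hp, Bool.false_eq_true, if_false,
        List.append_nil]
      rw [pv_popAll_append _ bs [r]
        (by
          rw [List.pairwise_reverse]
          exact (PySem.List.pairwise_lt_pyRange_one 0 _).filter _)
        (by
          intro i hi
          rw [List.mem_reverse] at hi
          have := PySem.List.mem_pyRange_one.mp (List.mem_of_mem_filter hi)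
          exact ⟨this.1, this.2⟩)]
      rw [ih]
      simp [List.filter_append, hp]

-- ===== VERDICT (by name: the statement is the Claim_ definition above) =====
theorem row_del_spec : Claim_equal_row_del := by
  intro board _
  show row_del board = row_del_alt board
  unfold row_del row_del_alt
  rw [pv_foldl_add_filter _ _ _ (PySem.List.nodup_pyRange_one 0 _) (by simp [PySem.Set.empty])]
  simp only [PySem.Set.empty, List.nil_append]
  rw [PySem.List.sorted_rev_eq_of_perm_of_pairwise_gt _
        (((PySem.List.pyRange 0 (board.length : Int) 1).filter
            (fun i => (PySem.List.pyGetD board i []).all (fun cell => cell == -1))).reverse)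
        (fun x => x)
        (List.reverse_perm _)
        (by
          rw [List.pairwise_reverse]
          exact (PySem.List.pairwise_lt_pyRange_one 0 _).filter _)]
  rw [pv_pop_filter (fun row => row.all (fun cell => cell == -1)) board]
  apply List.filter_congr
  intro row _
  simp [List.any_eq_not_all_not, bne]
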